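-- pv_equiv track=rewrite | github.com/PepperXZC/MRI-Simulation-Python | image.py | get_point_index
-- ===== SOURCE A (Python) =====
-- def get_point_index(length, bandwidth):
--     # 矩形
--     # TODO：生成两个 point_index 集合
--     li_vassel, li_muscle = [], []
--     a, b = int(length // 2), int(bandwidth // 2)
--     lower, upper = a - b, a + b
--     for i in range(length):
--         for j in range(length):
--             if j >= lower and j < upper:
--                 li_vassel.append((i, j))
--             else:
--                 li_muscle.append((i, j))
--     return li_vassel, li_muscle
-- ===== SOURCE B (Python) =====
-- def get_point_index(length, bandwidth):
--     # Decide the column partition once: the band is the clamped contiguous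
--     # range [lo, hi); its complement within a row is two ranges.
--     a, b = int(length // 2), int(bandwidth // 2)
--     lo = max(0, min(a - b, length))
--     hi = max(lo, min(a + b, length))
--     band = list(range(lo, hi))
--     rest = list(range(0, lo)) + list(range(hi, length))
--     li_vassel = [(i, j) for i in range(length) for j in band]
--     li_muscle = [(i, j) for i in range(length) for j in rest]
--     return li_vassel, li_muscle
-- ===== Notes on version B (the rewrite author's own statement) =====
-- stated objective: simpler
-- what changed: B computes the clamped band column range [lo,hi) once and builds both lists by nested comprehensions over precomputed column ranges, removing A's per-point membership branch.
import Mathlib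
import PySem

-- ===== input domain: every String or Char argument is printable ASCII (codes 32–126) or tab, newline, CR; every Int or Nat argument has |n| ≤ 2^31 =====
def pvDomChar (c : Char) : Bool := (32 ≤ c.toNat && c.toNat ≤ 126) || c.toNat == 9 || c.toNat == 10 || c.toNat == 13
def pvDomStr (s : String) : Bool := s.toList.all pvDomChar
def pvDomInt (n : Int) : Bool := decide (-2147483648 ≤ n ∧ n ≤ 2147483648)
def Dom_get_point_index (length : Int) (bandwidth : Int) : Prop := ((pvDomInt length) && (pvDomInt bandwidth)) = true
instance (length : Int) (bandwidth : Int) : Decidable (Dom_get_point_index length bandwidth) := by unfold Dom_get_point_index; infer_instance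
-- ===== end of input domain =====

-- B decides the band/complement column partition once as clamped ranges instead of testing each point; objective: simpler.

-- ===== PORT A =====
def get_point_index (length : Int) (bandwidth : Int) : (List (Int × Int)) × (List (Int × Int)) :=
  let a := PySem.Int.floordiv length 2
  let b := PySem.Int.floordiv bandwidth 2
  let lower := a - b
  let upper := a + b
  -- each .append is O(1): accumulate with cons and reverse once at the end
  let st := (PySem.List.pyRange 0 length 1).foldl
    (fun (st : List (Int × Int) × List (Int × Int)) i =>
      (PySem.List.pyRange 0 length 1).foldl
        (fun st j =>
          if lower ≤ j ∧ j < upper then ((i, j) :: st.1, st.2)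
          else (st.1, (i, j) :: st.2))
        st)
    ([], [])
  (st.1.reverse, st.2.reverse)

-- ===== PORT B =====
def get_point_index_alt (length : Int) (bandwidth : Int) : (List (Int × Int)) × (List (Int × Int)) :=
  let a := PySem.Int.floordiv length 2
  let b := PySem.Int.floordiv bandwidth 2
  let lo := max 0 (min (a - b) length)
  let hi := max lo (min (a + b) length)
  let band := PySem.List.pyRange lo hi 1
  let rest := PySem.List.pyRange 0 lo 1 ++ PySem.List.pyRange hi length 1
  ((PySem.List.pyRange 0 length 1).flatMap (fun i => band.map (fun j => (i, j))),
   (PySem.List.pyRange 0 length 1).flatMap (fun i => rest.map (fun j => (i, j))))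

-- ===== PRECONDITION & SPEC =====
def Spec_get_point_index (length : Int) (bandwidth : Int) (out : (List (Int × Int)) × (List (Int × Int))) : Prop := out = get_point_index_alt length bandwidth
instance (length : Int) (bandwidth : Int) (out : (List (Int × Int)) × (List (Int × Int))) : Decidable (Spec_get_point_index length bandwidth out) := by unfold Spec_get_point_index; infer_instance

-- ===== CLAIM (what is proved, stated in full; the proofs are below) =====
def Claim_equal_get_point_index : Prop := ∀ (length : Int) (bandwidth : Int), Dom_get_point_index length bandwidth → Spec_get_point_index length bandwidth (get_point_index length bandwidth)

-- ===== LEMMAS AND PROOFS =====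

-- A's inner loop from state (v, m): conses the p-columns onto v and the rest onto m.
theorem pv_inner_fold (p : Int → Prop) [DecidablePred p] (i : Int) :
    ∀ (cols : List Int) (v m : List (Int × Int)),
      cols.foldl
        (fun (st : List (Int × Int) × List (Int × Int)) j =>
          if p j then ((i, j) :: st.1, st.2) else (st.1, (i, j) :: st.2))
        (v, m)
      = (((cols.filter (fun j => decide (p j))).map (fun j => (i, j))).reverse ++ v,
         ((cols.filter (fun j => !decide (p j))).map (fun j => (i, j))).reverse ++ m) := by
  intro cols
  induction cols with
  | nil => intro v m; simp
  | cons c cs ih =>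
      intro v m
      by_cases hc : p c
      · simp [List.foldl_cons, hc, ih, List.append_assoc]
      · simp [List.foldl_cons, hc, ih, List.append_assoc]

-- A's double loop, with the filters of each row rewritten to fixed lists.
theorem pv_outer_fold (p : Int → Prop) [DecidablePred p] (cols band rest : List Int)
    (hb : cols.filter (fun j => decide (p j)) = band)
    (hr : cols.filter (fun j => !decide (p j)) = rest) :
    ∀ (rows : List Int) (v m : List (Int × Int)),
      rows.foldl
        (fun (st : List (Int × Int) × List (Int × Int)) i =>
          cols.foldl
            (fun st j =>
              if p j then ((i, j) :: st.1, st.2) else (st.1, (i, j) :: st.2))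
            st)
        (v, m)
      = ((rows.flatMap (fun i => band.map (fun j => (i, j)))).reverse ++ v,
         (rows.flatMap (fun i => rest.map (fun j => (i, j)))).reverse ++ m) := by
  intro rows
  induction rows with
  | nil => intro v m; simp
  | cons r rs ih =>
      intro v m
      rw [List.foldl_cons, pv_inner_fold p r cols v m, hb, hr, ih]
      simp [List.append_assoc]

theorem get_point_index_spec : Claim_equal_get_point_index := by
  intro length bandwidth _
  unfold Spec_get_point_index get_point_index get_point_index_alt
  dsimp only
  set a := PySem.Int.floordiv length 2 with ha
  set b := PySem.Int.floordiv bandwidth 2 with hb2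
  set lower := a - b with hlow
  set upper := a + b with hup
  set lo := max 0 (min lower length) with hlo
  set hi := max lo (min upper length) with hhi
  by_cases hlen : length ≤ 0
  · rw [PySem.List.pyRange_one_eq_nil hlen]
    simp
  · have hlen' : 0 < length := by omega
    have h0lo : (0 : Int) ≤ lo := le_max_left _ _
    have hlole : lo ≤ length := by omega
    have hlohi : lo ≤ hi := le_max_left _ _
    have hhile : hi ≤ length := by omega
    have hsplit : PySem.List.pyRange 0 length 1
        = PySem.List.pyRange 0 lo 1 ++ PySem.List.pyRange lo hi 1
            ++ PySem.List.pyRange hi length 1 := by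
      rw [PySem.List.pyRange_one_append 0 lo length h0lo hlole,
          PySem.List.pyRange_one_append lo hi length hlohi hhile,
          List.append_assoc]
    have hfb : (PySem.List.pyRange 0 length 1).filter
        (fun j => decide (lower ≤ j ∧ j < upper)) = PySem.List.pyRange lo hi 1 := by
      rw [hsplit, List.filter_append, List.filter_append]
      have e1 : (PySem.List.pyRange 0 lo 1).filter
          (fun j => decide (lower ≤ j ∧ j < upper)) = [] := by
        apply List.filter_eq_nil_iff.mpr
        intro j hj
        have hmem := (PySem.List.mem_pyRange_one).mp hj
        simp only [decide_eq_true_eq, not_and, not_lt]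
        omega
      have e2 : (PySem.List.pyRange lo hi 1).filter
          (fun j => decide (lower ≤ j ∧ j < upper)) = PySem.List.pyRange lo hi 1 := by
        apply List.filter_eq_self.mpr
        intro j hj
        have hmem := (PySem.List.mem_pyRange_one).mp hj
        simp only [decide_eq_true_eq]
        omega
      have e3 : (PySem.List.pyRange hi length 1).filter
          (fun j => decide (lower ≤ j ∧ j < upper)) = [] := by
        apply List.filter_eq_nil_iff.mpr
        intro j hj
        have hmem := (PySem.List.mem_pyRange_one).mp hj
        simp only [decide_eq_true_eq, not_and, not_lt]
        omega
      rw [e1, e2, e3]; simp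
    have hfr : (PySem.List.pyRange 0 length 1).filter
        (fun j => !decide (lower ≤ j ∧ j < upper))
        = PySem.List.pyRange 0 lo 1 ++ PySem.List.pyRange hi length 1 := by
      rw [hsplit, List.filter_append, List.filter_append]
      have e1 : (PySem.List.pyRange 0 lo 1).filter
          (fun j => !decide (lower ≤ j ∧ j < upper)) = PySem.List.pyRange 0 lo 1 := by
        apply List.filter_eq_self.mpr
        intro j hj
        have hmem := (PySem.List.mem_pyRange_one).mp hj
        simp only [Bool.not_eq_true', decide_eq_false_iff_not, not_and, not_lt]
        omega
      have e2 : (PySem.List.pyRange lo hi 1).filter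
          (fun j => !decide (lower ≤ j ∧ j < upper)) = [] := by
        apply List.filter_eq_nil_iff.mpr
        intro j hj
        have hmem := (PySem.List.mem_pyRange_one).mp hj
        simp only [Bool.not_eq_true', decide_eq_false_iff_not, not_and, not_lt]
        omega
      have e3 : (PySem.List.pyRange hi length 1).filter
          (fun j => !decide (lower ≤ j ∧ j < upper)) = PySem.List.pyRange hi length 1 := by
        apply List.filter_eq_self.mpr
        intro j hj
        have hmem := (PySem.List.mem_pyRange_one).mp hj
        simp only [Bool.not_eq_true', decide_eq_false_iff_not, not_and, not_lt]
        omega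
      rw [e1, e2, e3]; simp
    rw [pv_outer_fold (fun j => lower ≤ j ∧ j < upper) _ _ _ hfb hfr]
    simp only [List.append_nil, List.reverse_reverse]
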